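-- pv_equiv track=rewrite | github.com/pypi-data/pypi-mirror-121 | packages/nwcicdsetup/nwcicdsetup-0.0.0.dev0.tar.gz/nwcicdsetup-0.0.0.dev0/nwcicdsetup/validationschema.py | unique_object
-- ===== SOURCE A (Python) =====
-- from typing import Any, Dict, List, Set
--
-- def unique_object(values: List[Dict[str, Any]]) -> bool:
--     items: Set[str] = set()
--     for v in values:
--         for k in v.keys():
--             if k in items:
--                 return False
--             items.add(k)
--     return True
-- ===== SOURCE B (Python) =====
-- def unique_object(values):
--     all_keys = sorted(k for v in values for k in v.keys())
--     return all(a != b for a, b in zip(all_keys, all_keys[1:]))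
-- ===== Notes on version B (the rewrite author's own statement) =====
-- stated objective: alternative
-- what changed: Replaced the incremental set-membership loop with an early return by a sort-then-scan: flatten all keys, sort them, and check that no two adjacent sorted keys are equal.
import Mathlib
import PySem

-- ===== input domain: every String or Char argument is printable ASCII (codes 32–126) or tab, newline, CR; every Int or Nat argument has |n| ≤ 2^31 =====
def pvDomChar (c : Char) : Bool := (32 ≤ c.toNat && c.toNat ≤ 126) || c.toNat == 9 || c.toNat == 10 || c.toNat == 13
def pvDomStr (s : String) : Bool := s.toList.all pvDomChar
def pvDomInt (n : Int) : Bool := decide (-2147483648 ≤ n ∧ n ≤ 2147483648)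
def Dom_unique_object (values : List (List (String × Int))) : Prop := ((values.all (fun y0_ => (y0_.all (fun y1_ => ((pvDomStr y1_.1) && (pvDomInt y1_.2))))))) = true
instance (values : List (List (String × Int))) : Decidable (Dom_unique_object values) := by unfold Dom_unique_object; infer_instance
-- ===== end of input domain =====

-- B replaces A's incremental set-membership loop (early return on a repeated key) with a
-- sort-then-scan: flatten all keys, sort, and check no two adjacent sorted keys are equal
-- (alternative algorithm, O(n log n) comparisons instead of a hash set).

-- ===== PORT A =====
-- v.keys(): distinct keys of the dict represented by v, first occurrences in order
def pyKeys (v : List (String × Int)) : List String := PySem.List.dedup (v.map Prod.fst)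

-- inner 'for k in v.keys()': none models the early 'return False'
def uoInner : List String → PySem.Set String → Option (PySem.Set String)
  | [], items => some items
  | k :: ks, items =>
      if PySem.Set.contains items k then none
      else uoInner ks (PySem.Set.add items k)

def uoOuter : List (List (String × Int)) → PySem.Set String → Bool
  | [], _ => true
  | v :: vs, items =>
      match uoInner (pyKeys v) items with
      | none => false
      | some items' => uoOuter vs items'

def unique_object (values : List (List (String × Int))) : Bool :=
  uoOuter values PySem.Set.empty

-- ===== PORT B =====
-- sorted(k for v in values for k in v.keys()); all(a != b for (a,b) in zip(l, l[1:]))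
def unique_object_alt (values : List (List (String × Int))) : Bool :=
  let allKeys := PySem.List.sorted (values.flatMap (fun v => pyKeys v)) (fun k => k) false
  (allKeys.zip (allKeys.drop 1)).all (fun p => p.1 != p.2)

-- ===== PRECONDITION & SPEC =====
def Spec_unique_object (values : List (List (String × Int))) (out : Bool) : Prop := out = unique_object_alt values
instance (values : List (List (String × Int))) (out : Bool) : Decidable (Spec_unique_object values out) := by unfold Spec_unique_object; infer_instance

-- ===== CLAIM (what is proved, stated in full; the proofs are below) =====
def Claim_equal_unique_object : Prop := ∀ (values : List (List (String × Int))), Dom_unique_object values → Spec_unique_object values (unique_object values)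

-- ===== LEMMAS AND PROOFS =====

theorem uoInner_eq (ks : List String) (items : PySem.Set String) (h : items.Nodup) :
    uoInner ks items = if (items ++ ks).Nodup then some (items ++ ks) else none := by
  induction ks generalizing items with
  | nil => simp [uoInner, h]
  | cons k ks ih =>
      by_cases hk : k ∈ items
      · have : ¬ (items ++ k :: ks).Nodup := by
          intro hn
          exact (List.disjoint_of_nodup_append hn) hk List.mem_cons_self
        simp [uoInner, hk, this]
      · have hadd : PySem.Set.add items k = items ++ [k] := by
          simp [PySem.Set.add, hk]
        have hnd : (items ++ [k]).Nodup := by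
          rw [List.nodup_append]
          exact ⟨h, List.nodup_singleton k, fun a ha b hb hab => hk ((hab.trans (List.mem_singleton.1 hb)) ▸ ha)⟩
        rw [uoInner]
        rw [if_neg (by simp [hk]), hadd, ih _ hnd]
        simp [List.append_assoc]

theorem uoOuter_eq (vs : List (List (String × Int))) (items : PySem.Set String)
    (h : items.Nodup) :
    uoOuter vs items = decide ((items ++ vs.flatMap pyKeys).Nodup) := by
  induction vs generalizing items with
  | nil => simp [uoOuter, h]
  | cons v vs ih =>
      rw [uoOuter, uoInner_eq _ _ h]
      by_cases hv : (items ++ pyKeys v).Nodup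
      · rw [if_pos hv]
        simp only [ih _ hv, List.flatMap_cons, List.append_assoc]
      · rw [if_neg hv]
        have hnot : ¬ (items ++ (pyKeys v ++ vs.flatMap pyKeys)).Nodup := by
          rw [← List.append_assoc]
          intro hn
          exact hv (hn.sublist ((items ++ pyKeys v).sublist_append_left _))
        simp [List.flatMap_cons, hnot]

-- the zip-with-tail 'all' test computes IsChain (· ≠ ·)
theorem zip_tail_all_eq_chain' (l : List String) :
    (l.zip (l.drop 1)).all (fun p => p.1 != p.2) = decide (l.IsChain (· ≠ ·)) := by
  induction l with
  | nil => simp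
  | cons a l ih =>
      cases l with
      | nil => simp
      | cons b t =>
          have ih' := ih
          simp only [List.drop_one, List.tail_cons, List.zip_cons_cons, List.all_cons,
            List.isChain_cons_cons] at ih' ⊢
          rw [ih']
          by_cases hab : a = b <;> simp [hab, bne]

-- on a (≤)-sorted list, no adjacent equal elements is exactly Nodup
theorem chain'_ne_iff_nodup (l : List String) (hs : l.Pairwise (· ≤ ·)) :
    l.IsChain (· ≠ ·) ↔ l.Nodup := by
  constructor
  · intro hc
    induction l with
    | nil => simp
    | cons a l ih =>
        rw [List.isChain_cons] at hc
        rw [List.pairwise_cons] at hs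
        have hlt : ∀ b ∈ l, a < b := by
          intro b hb
          cases l with
          | nil => cases hb
          | cons c t =>
              have hac : a < c := lt_of_le_of_ne (hs.1 c List.mem_cons_self) (hc.1 c rfl)
              rcases List.mem_cons.1 hb with rfl | hb
              · exact hac
              · have : c ≤ b := List.rel_of_pairwise_cons hs.2 hb
                exact lt_of_lt_of_le hac this
        exact List.nodup_cons.2 ⟨fun hmem => lt_irrefl a (hlt a hmem), ih hs.2 hc.2⟩
  · intro hn
    exact List.Pairwise.isChain (hn.imp fun h => h)

theorem unique_object_eq (values : List (List (String × Int))) :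
    unique_object values = unique_object_alt values := by
  have hA : unique_object values = decide ((values.flatMap pyKeys).Nodup) := by
    simpa using uoOuter_eq values PySem.Set.empty (by simp [PySem.Set.empty])
  set l := PySem.List.sorted (values.flatMap (fun v => pyKeys v)) (fun k => k) false with hl
  have hperm : l.Perm (values.flatMap pyKeys) := PySem.List.sorted_perm _ _ _
  have hpw : l.Pairwise (· ≤ ·) := by
    simpa using PySem.List.sorted_pairwise (values.flatMap (fun v => pyKeys v)) (fun k => k)
  rw [hA, unique_object_alt]
  simp only [← hl, zip_tail_all_eq_chain']
  have : (values.flatMap pyKeys).Nodup ↔ l.IsChain (· ≠ ·) := by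
    rw [chain'_ne_iff_nodup l hpw]
    exact (hperm.nodup_iff).symm
  by_cases h : (values.flatMap pyKeys).Nodup
  · simp [h, this.1 h]
  · rw [decide_eq_false h, decide_eq_false (fun hc => h (this.2 hc))]

-- ===== VERDICT (by name: the statement is the Claim_ definition above) =====
theorem unique_object_spec : Claim_equal_unique_object := by
  intro values _
  exact unique_object_eq values
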